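-- pv_equiv track=rewrite | github.com/rolfisobko-collab/affidavit-manager | pdf_filler.py | _build_affidavit_values
-- ===== SOURCE A (Python) =====
-- WORK_FIELDS = {
--     # nombre_en_record  : (nombre_campo_pdf, índice_si_duplicado)
--     "omo_number"        : "1",     # header pág 1, ítem 3 y header pág 2 (mismo nombre → sync)
--     # county ('2') lo completa la escribana — NO se rellena desde el sistema
--     "date_directed"     : "4",
--     "building_address"  : "5",
--     "work_start_date"   : "6",     # "beginning on ___"
--     "work_end_date"     : "7",     # "completed on ___"
--     # work_contractor_name: campo '3' ya tiene el texto del juramento hardcodeado en el template — NO se pisa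
--     "signer_name"       : "15",   # Type or Print Name del firmante (pág 2)
--     "partial_reason"    : "8",
--     "partial_amount"    : "9",
--     "interrupted_amount": "10",
--     "prevented_name"    : "11",    # pág 2 — quien impidió
--     "prevented_rel"     : "13",    # "as: ___"
--     "prevented_desc"    : "14",
--     # sworn_day/month/year: los completa la notaria a mano — NO se rellenan desde el sistema
-- }
--
-- NOWORK_FIELDS = {
--     "omo_number"        : "1",     # header + ítem 2 OMO# (sync automático)
--     # county ('2') lo completa la escribana — NO se rellena desde el sistema
--     "building_address"  : "23",    # "to go to building located at ___"
--     "service_charge"    : "4",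
--     "inacc_reason"      : "5",     # línea 1 de inaccesibilidad
--     "inacc_reason2"     : "6",     # línea 2 de inaccesibilidad
--     "attempt_date1"     : "7",
--     "attempt_date2"     : "9",
--     "phone_date1"       : "8",
--     "phone_date2"       : "10",
--     "arrival_5"         : "11",
--     "arrival_6"         : "12",
--     "contractor_name"   : "13",
--     "arrival_7"         : "14",    # pág 2 — ítem 7 "work site on ___"
--     "individual_name"   : "15",
--     "individual_rel"    : "16",    # "building ___"
--     "individual_desc"   : "17",
--     "individual_phone"  : "18",
--     "signer_name"       : "50",   # Type or Print Name del firmante (pág 2)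
--     # sworn_day/month/year: los completa la notaria a mano — NO se rellenan desde el sistema
-- }
--
-- def _build_affidavit_values(record: dict) -> dict:
--     """Construye el dict de valores para el affidavit (work o nowork)."""
--     fields = WORK_FIELDS if record.get("doc_type") == "work" else NOWORK_FIELDS
--     values = {}
--
--     for rec_key, pdf_key in fields.items():
--         val = record.get(rec_key, "") or ""
--
--         # sworn_year: solo 2 dígitos (el template ya imprime "20")
--         if rec_key == "sworn_year" and len(val) >= 4:
--             val = val[-2:]
--
--         # arrival_5/6/7 no existen en record → mapear arrival_date al campo correcto según razón
--         if rec_key in ("arrival_5", "arrival_6", "arrival_7"):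
--             reason = str(record.get("nowork_reason") or "")
--             reason_to_key = {"5": "arrival_5", "6": "arrival_6", "7": "arrival_7"}
--             if reason_to_key.get(reason) == rec_key:
--                 val = record.get("arrival_date", "") or ""
--             else:
--                 val = ""
--
--         # inacc_reason2 no existe como campo en record → se divide inacc_reason
--         if rec_key == "inacc_reason2":
--             full = record.get("inacc_reason", "") or ""
--             # Si el texto es largo, dividir en mitad para las dos líneas
--             mid = len(full) // 2
--             if len(full) > 60:
--                 # Cortar en el espacio más cercano a la mitad
--                 cut = full.rfind(" ", 0, mid + 10)
--                 val = full[cut:].strip() if cut > 0 else full[mid:]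
--             else:
--                 val = ""  # Si es corto, entra en la primera línea sola
--
--         if rec_key == "inacc_reason" and record.get("inacc_reason", ""):
--             full = record.get("inacc_reason", "") or ""
--             if len(full) > 60:
--                 mid = len(full) // 2
--                 cut = full.rfind(" ", 0, mid + 10)
--                 val = full[:cut].strip() if cut > 0 else full[:mid]
--
--         if val:
--             values[pdf_key] = val
--
--     return values
-- ===== SOURCE B (Python) =====
-- def _split_inacc(full):
--     """Split the inaccessibility text into the two PDF lines (one rfind cut)."""
--     if len(full) <= 60:
--         return full, ""
--     cut = full.rfind(" ", 0, len(full) // 2 + 10)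
--     if cut > 0:
--         return full[:cut].strip(), full[cut:].strip()
--     mid = len(full) // 2
--     return full[:mid], full[mid:]
--
--
-- def _build_affidavit_values(record: dict) -> dict:
--     """Straight-line construction: no field table, no generic loop."""
--     def g(k):
--         return record.get(k) or ""
--
--     values = {}
--
--     def put(pdf, v):
--         if v:
--             values[pdf] = v
--
--     if record.get("doc_type") == "work":
--         put("1", g("omo_number"))
--         put("4", g("date_directed"))
--         put("5", g("building_address"))
--         put("6", g("work_start_date"))
--         put("7", g("work_end_date"))
--         put("15", g("signer_name"))
--         put("8", g("partial_reason"))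
--         put("9", g("partial_amount"))
--         put("10", g("interrupted_amount"))
--         put("11", g("prevented_name"))
--         put("13", g("prevented_rel"))
--         put("14", g("prevented_desc"))
--     else:
--         line1, line2 = _split_inacc(g("inacc_reason"))
--         reason = g("nowork_reason")
--         arrival = g("arrival_date")
--         put("1", g("omo_number"))
--         put("23", g("building_address"))
--         put("4", g("service_charge"))
--         put("5", line1)
--         put("6", line2)
--         put("7", g("attempt_date1"))
--         put("9", g("attempt_date2"))
--         put("8", g("phone_date1"))
--         put("10", g("phone_date2"))
--         put("11", arrival if reason == "5" else "")
--         put("12", arrival if reason == "6" else "")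
--         put("13", g("contractor_name"))
--         put("14", arrival if reason == "7" else "")
--         put("15", g("individual_name"))
--         put("16", g("individual_rel"))
--         put("17", g("individual_desc"))
--         put("18", g("individual_phone"))
--         put("50", g("signer_name"))
--     return values
-- ===== Notes on version B (the rewrite author's own statement) =====
-- stated objective: simpler
-- what changed: A interprets a field-name-to-pdf-key table in one generic loop whose body re-tests every special case per key; B has no table and no loop: it computes the derived values once (one rfind-based split of inacc_reason, one comparison-based arrival routing) and assigns each PDF field in straight-line code.
import Mathlib
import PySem

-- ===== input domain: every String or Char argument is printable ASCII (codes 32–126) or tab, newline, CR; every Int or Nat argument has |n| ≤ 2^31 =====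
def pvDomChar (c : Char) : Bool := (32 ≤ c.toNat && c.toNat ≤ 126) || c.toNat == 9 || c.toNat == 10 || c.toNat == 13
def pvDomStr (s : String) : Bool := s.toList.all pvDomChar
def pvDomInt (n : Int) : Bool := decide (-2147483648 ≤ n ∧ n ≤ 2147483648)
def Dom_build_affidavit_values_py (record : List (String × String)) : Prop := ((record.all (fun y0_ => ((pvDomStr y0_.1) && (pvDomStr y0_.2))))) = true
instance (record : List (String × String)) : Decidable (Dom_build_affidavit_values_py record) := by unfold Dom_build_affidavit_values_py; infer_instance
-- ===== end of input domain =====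

-- B replaces A's generic table-driven loop (with its in-loop special-casing) by straight-line
-- per-PDF-field assignments with the derived values (inacc split, arrival routing) computed once;
-- return value only, no mutation. Objective: simpler.

-- shared helper: record.get(k) or "" — record values are strings, so this is getD with default ""
def pvGet (record : List (String × String)) (k : String) : String :=
  (PySem.Dict.mk record).getD k ""

-- ===== PORT A =====
def WORK_FIELDS : List (String × String) :=
  [("omo_number", "1"), ("date_directed", "4"), ("building_address", "5"),
   ("work_start_date", "6"), ("work_end_date", "7"), ("signer_name", "15"),
   ("partial_reason", "8"), ("partial_amount", "9"), ("interrupted_amount", "10"),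
   ("prevented_name", "11"), ("prevented_rel", "13"), ("prevented_desc", "14")]

def NOWORK_FIELDS : List (String × String) :=
  [("omo_number", "1"), ("building_address", "23"), ("service_charge", "4"),
   ("inacc_reason", "5"), ("inacc_reason2", "6"), ("attempt_date1", "7"),
   ("attempt_date2", "9"), ("phone_date1", "8"), ("phone_date2", "10"),
   ("arrival_5", "11"), ("arrival_6", "12"), ("contractor_name", "13"),
   ("arrival_7", "14"), ("individual_name", "15"), ("individual_rel", "16"),
   ("individual_desc", "17"), ("individual_phone", "18"), ("signer_name", "50")]

-- the body of A's loop computing `val` for one rec_key (transliterated branch by branch)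
def pvStepA (record : List (String × String)) (rec_key : String) : String :=
  let val := pvGet record rec_key
  let val := if rec_key = "sworn_year" then
      (if 4 ≤ PySem.Str.len val then PySem.Str.slice val (some (-2)) none else val)
    else val
  let val := if rec_key = "arrival_5" ∨ rec_key = "arrival_6" ∨ rec_key = "arrival_7" then
      let reason := pvGet record "nowork_reason"
      let reason_to_key : PySem.Dict String String :=
        PySem.Dict.mk [("5", "arrival_5"), ("6", "arrival_6"), ("7", "arrival_7")]
      if reason_to_key.get? reason = some rec_key then pvGet record "arrival_date" else ""
    else val
  let val := if rec_key = "inacc_reason2" then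
      let full := pvGet record "inacc_reason"
      let mid := PySem.Int.floordiv (PySem.Str.len full) 2
      if 60 < PySem.Str.len full then
        let cut := PySem.Str.rfindFrom full " " 0 (some (mid + 10))
        if 0 < cut then PySem.Str.strip (PySem.Str.slice full (some cut) none)
        else PySem.Str.slice full (some mid) none
      else ""
    else val
  let val := if rec_key = "inacc_reason" then
      if pvGet record "inacc_reason" ≠ "" then
      let full := pvGet record "inacc_reason"
      if 60 < PySem.Str.len full then
        let mid := PySem.Int.floordiv (PySem.Str.len full) 2
        let cut := PySem.Str.rfindFrom full " " 0 (some (mid + 10))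
        if 0 < cut then PySem.Str.strip (PySem.Str.slice full none (some cut))
        else PySem.Str.slice full none (some mid)
      else val
      else val
    else val
  val

def build_affidavit_values_py (record : List (String × String)) : List (String × String) :=
  let fields := if (PySem.Dict.mk record).get? "doc_type" = some "work" then WORK_FIELDS else NOWORK_FIELDS
  (fields.foldl (fun values kv =>
      let val := pvStepA record kv.1
      if val ≠ "" then values.insert kv.2 val else values)
    PySem.Dict.empty).items

-- ===== PORT B =====
-- split the inaccessibility text into the two PDF lines (one rfind cut)
def pvSplitInacc (full : String) : String × String :=
  if PySem.Str.len full ≤ 60 then (full, "")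
  else
    let cut := PySem.Str.rfindFrom full " " 0 (some (PySem.Int.floordiv (PySem.Str.len full) 2 + 10))
    if 0 < cut then
      (PySem.Str.strip (PySem.Str.slice full none (some cut)),
       PySem.Str.strip (PySem.Str.slice full (some cut) none))
    else
      let mid := PySem.Int.floordiv (PySem.Str.len full) 2
      (PySem.Str.slice full none (some mid), PySem.Str.slice full (some mid) none)

-- put(pdf, v): values[pdf] = v, only if v is non-empty
def pvPut (values : PySem.Dict String String) (pdf v : String) : PySem.Dict String String :=
  if v ≠ "" then values.insert pdf v else values

def build_affidavit_values_py_alt (record : List (String × String)) : List (String × String) :=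
  if (PySem.Dict.mk record).get? "doc_type" = some "work" then
    let d := pvPut PySem.Dict.empty "1" (pvGet record "omo_number")
    let d := pvPut d "4" (pvGet record "date_directed")
    let d := pvPut d "5" (pvGet record "building_address")
    let d := pvPut d "6" (pvGet record "work_start_date")
    let d := pvPut d "7" (pvGet record "work_end_date")
    let d := pvPut d "15" (pvGet record "signer_name")
    let d := pvPut d "8" (pvGet record "partial_reason")
    let d := pvPut d "9" (pvGet record "partial_amount")
    let d := pvPut d "10" (pvGet record "interrupted_amount")
    let d := pvPut d "11" (pvGet record "prevented_name")
    let d := pvPut d "13" (pvGet record "prevented_rel")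
    let d := pvPut d "14" (pvGet record "prevented_desc")
    d.items
  else
    let l12 := pvSplitInacc (pvGet record "inacc_reason")
    let reason := pvGet record "nowork_reason"
    let arrival := pvGet record "arrival_date"
    let d := pvPut PySem.Dict.empty "1" (pvGet record "omo_number")
    let d := pvPut d "23" (pvGet record "building_address")
    let d := pvPut d "4" (pvGet record "service_charge")
    let d := pvPut d "5" l12.1
    let d := pvPut d "6" l12.2
    let d := pvPut d "7" (pvGet record "attempt_date1")
    let d := pvPut d "9" (pvGet record "attempt_date2")
    let d := pvPut d "8" (pvGet record "phone_date1")
    let d := pvPut d "10" (pvGet record "phone_date2")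
    let d := pvPut d "11" (if reason = "5" then arrival else "")
    let d := pvPut d "12" (if reason = "6" then arrival else "")
    let d := pvPut d "13" (pvGet record "contractor_name")
    let d := pvPut d "14" (if reason = "7" then arrival else "")
    let d := pvPut d "15" (pvGet record "individual_name")
    let d := pvPut d "16" (pvGet record "individual_rel")
    let d := pvPut d "17" (pvGet record "individual_desc")
    let d := pvPut d "18" (pvGet record "individual_phone")
    let d := pvPut d "50" (pvGet record "signer_name")
    d.items

-- ===== PRECONDITION & SPEC =====
def Spec_build_affidavit_values_py (record : List (String × String)) (out : List (String × String)) : Prop := out = build_affidavit_values_py_alt record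
instance (record : List (String × String)) (out : List (String × String)) : Decidable (Spec_build_affidavit_values_py record out) := by unfold Spec_build_affidavit_values_py; infer_instance

-- ===== CLAIM (what is proved, stated in full; the proofs are below) =====
def Claim_equal_build_affidavit_values_py : Prop := ∀ (record : List (String × String)), Dom_build_affidavit_values_py record → Spec_build_affidavit_values_py record (build_affidavit_values_py record)

-- ===== LEMMAS AND PROOFS =====

-- a fresh-key insert appends to a dict's items
theorem pv_insert_fresh {κ ν : Type} [BEq κ] (d : PySem.Dict κ ν) (k : κ) (v : ν)
    (h : d.contains k = false) : (d.insert k v).items = d.items ++ [(k, v)] := by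
  simp [PySem.Dict.insert, h]

-- a conditional-insert fold over (key, value) pairs with fresh, pairwise-distinct keys keeps
-- exactly the pairs with a non-empty value, in order
theorem pv_put_fold_items :
    ∀ (ps : List (String × String)) (d : PySem.Dict String String),
    (∀ p ∈ ps, d.contains p.1 = false) → (ps.map Prod.fst).Nodup →
    (ps.foldl (fun d p => pvPut d p.1 p.2) d).items
      = d.items ++ ps.filter (fun p => p.2 ≠ "") := by
  intro ps
  induction ps with
  | nil => intro d _ _; simp
  | cons p rest ih =>
    intro d hfresh hnd
    rw [List.map_cons, List.nodup_cons] at hnd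
    simp only [List.foldl_cons, List.filter_cons]
    by_cases hv : p.2 ≠ ""
    · rw [if_pos (by simpa using hv)]
      show ((rest.foldl (fun d p => pvPut d p.1 p.2) (pvPut d p.1 p.2)).items) = _
      rw [pvPut, if_pos hv]
      rw [ih (d.insert p.1 p.2) ?_ hnd.2]
      · rw [pv_insert_fresh _ _ _ (hfresh p (List.mem_cons_self))]
        simp
      · intro p' hp'
        have hne : p'.1 ≠ p.1 := fun he => hnd.1 (he ▸ List.mem_map_of_mem hp')
        have := hfresh p' (List.mem_cons_of_mem _ hp')
        rw [PySem.Dict.contains_eq_isSome_get?, PySem.Dict.get?_insert_of_ne _ _ hne,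
          ← PySem.Dict.contains_eq_isSome_get?]
        exact this
    · rw [if_neg (by simpa using hv)]
      show ((rest.foldl (fun d p => pvPut d p.1 p.2) (pvPut d p.1 p.2)).items) = _
      rw [pvPut, if_neg hv]
      exact ih d (fun p' h => hfresh p' (List.mem_cons_of_mem _ h)) hnd.2

-- A's conditional-insert fold over fields with pairwise-distinct, fresh pdf keys is a filterMap
theorem pv_fold_items (record : List (String × String)) :
    ∀ (fields : List (String × String)) (d : PySem.Dict String String),
    (∀ kv ∈ fields, d.contains kv.2 = false) → (fields.map Prod.snd).Nodup →
    (fields.foldl (fun values kv =>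
        let val := pvStepA record kv.1
        if val ≠ "" then values.insert kv.2 val else values) d).items
      = d.items ++ fields.filterMap (fun kv =>
          let v := pvStepA record kv.1
          if v ≠ "" then some (kv.2, v) else none) := by
  intro fields
  induction fields with
  | nil => intro d _ _; simp
  | cons kv rest ih =>
    intro d hfresh hnd
    rw [List.map_cons, List.nodup_cons] at hnd
    simp only [List.foldl_cons, List.filterMap_cons]
    by_cases hv : pvStepA record kv.1 ≠ ""
    · rw [if_pos hv, if_pos hv]
      rw [ih (d.insert kv.2 (pvStepA record kv.1)) ?_ hnd.2]
      · rw [pv_insert_fresh _ _ _ (hfresh kv (List.mem_cons_self))]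
        simp
      · intro kv' hkv'
        have hne : kv'.2 ≠ kv.2 := fun he => hnd.1 (he ▸ List.mem_map_of_mem hkv')
        have := hfresh kv' (List.mem_cons_of_mem _ hkv')
        rw [PySem.Dict.contains_eq_isSome_get?, PySem.Dict.get?_insert_of_ne _ _ hne,
          ← PySem.Dict.contains_eq_isSome_get?]
        exact this
    · rw [if_neg hv, if_neg hv]
      rw [ih d (fun kv' h => hfresh kv' (List.mem_cons_of_mem _ h)) hnd.2]

-- a filterMap keeping pairs with non-empty value is the filter of the mapped pair list
theorem pv_filterMap_eq_filter_map (v : String × String → String) :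
    ∀ (l : List (String × String)),
    l.filterMap (fun kv => if v kv ≠ "" then some (kv.2, v kv) else none)
      = (l.map (fun kv => (kv.2, v kv))).filter (fun p => p.2 ≠ "") := by
  intro l
  induction l with
  | nil => rfl
  | cons kv rest ih =>
    simp only [List.filterMap_cons, List.map_cons, List.filter_cons]
    by_cases hv : v kv ≠ ""
    · rw [if_pos hv, if_pos (by simpa using hv), ih]
    · rw [if_neg hv, if_neg (by simpa using hv), ih]

theorem pv_len_pos_ne_empty (s : String) (h : (60 : Int) < (s.length : Int)) : s ≠ "" := by
  intro he; subst he; simp at h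

theorem pv_inacc1 (record : List (String × String)) :
    pvStepA record "inacc_reason" = (pvSplitInacc (pvGet record "inacc_reason")).1 := by
  show (let full := pvGet record "inacc_reason"
        if full ≠ "" then
          (if 60 < PySem.Str.len full then
            (let mid := PySem.Int.floordiv (PySem.Str.len full) 2
             let cut := PySem.Str.rfindFrom full " " 0 (some (mid + 10))
             if 0 < cut then PySem.Str.strip (PySem.Str.slice full none (some cut))
             else PySem.Str.slice full none (some mid))
           else full)
        else full)
      = (pvSplitInacc (pvGet record "inacc_reason")).1
  generalize pvGet record "inacc_reason" = full
  unfold pvSplitInacc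
  by_cases hle : (full.length : Int) ≤ 60
  · simp [hle, not_lt.mpr hle, ite_self]
  · have h60 := not_le.mp hle
    have hne := pv_len_pos_ne_empty full h60
    simp [hle, h60, hne]
    split_ifs <;> rfl

theorem pv_inacc2 (record : List (String × String)) :
    pvStepA record "inacc_reason2" = (pvSplitInacc (pvGet record "inacc_reason")).2 := by
  show (let full := pvGet record "inacc_reason"
        let mid := PySem.Int.floordiv (PySem.Str.len full) 2
        if 60 < PySem.Str.len full then
          (let cut := PySem.Str.rfindFrom full " " 0 (some (mid + 10))
           if 0 < cut then PySem.Str.strip (PySem.Str.slice full (some cut) none)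
           else PySem.Str.slice full (some mid) none)
        else "")
      = (pvSplitInacc (pvGet record "inacc_reason")).2
  generalize pvGet record "inacc_reason" = full
  unfold pvSplitInacc
  by_cases hle : (full.length : Int) ≤ 60
  · simp [hle, not_lt.mpr hle]
  · simp [hle, not_le.mp hle]
    split_ifs <;> rfl

-- A's arrival routing through the literal reason→key dict is B's direct comparison of the reason
theorem pv_reason_get (r : String) :
    (PySem.Dict.mk [("5", "arrival_5"), ("6", "arrival_6"), ("7", "arrival_7")]).get? r
      = (if r = "5" then some "arrival_5" else if r = "6" then some "arrival_6"
         else if r = "7" then some "arrival_7" else none) := by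
  by_cases h5 : r = "5"
  · subst h5; decide
  · by_cases h6 : r = "6"
    · subst h6; decide
    · by_cases h7 : r = "7"
      · subst h7; decide
      · have h5' : ("5" : String) ≠ r := fun h => h5 h.symm
        have h6' : ("6" : String) ≠ r := fun h => h6 h.symm
        have h7' : ("7" : String) ≠ r := fun h => h7 h.symm
        simp only [PySem.Dict.get?_mk_cons]
        simp [h5, h6, h7, h5', h6', h7', PySem.Dict.get?]

theorem pv_arr5 (record : List (String × String)) :
    pvStepA record "arrival_5"
      = (if pvGet record "nowork_reason" = "5" then pvGet record "arrival_date" else "") := by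
  show (if (PySem.Dict.mk [("5", "arrival_5"), ("6", "arrival_6"), ("7", "arrival_7")]).get?
          (pvGet record "nowork_reason") = some "arrival_5"
        then pvGet record "arrival_date" else "") = _
  rw [pv_reason_get]
  generalize pvGet record "nowork_reason" = r
  by_cases h5 : r = "5" <;> by_cases h6 : r = "6" <;> by_cases h7 : r = "7" <;>
    simp [h5, h6, h7]

theorem pv_arr6 (record : List (String × String)) :
    pvStepA record "arrival_6"
      = (if pvGet record "nowork_reason" = "6" then pvGet record "arrival_date" else "") := by
  show (if (PySem.Dict.mk [("5", "arrival_5"), ("6", "arrival_6"), ("7", "arrival_7")]).get?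
          (pvGet record "nowork_reason") = some "arrival_6"
        then pvGet record "arrival_date" else "") = _
  rw [pv_reason_get]
  generalize pvGet record "nowork_reason" = r
  by_cases h5 : r = "5" <;> by_cases h6 : r = "6" <;> by_cases h7 : r = "7" <;>
    simp [h5, h6, h7]

theorem pv_arr7 (record : List (String × String)) :
    pvStepA record "arrival_7"
      = (if pvGet record "nowork_reason" = "7" then pvGet record "arrival_date" else "") := by
  show (if (PySem.Dict.mk [("5", "arrival_5"), ("6", "arrival_6"), ("7", "arrival_7")]).get?
          (pvGet record "nowork_reason") = some "arrival_7"
        then pvGet record "arrival_date" else "") = _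
  rw [pv_reason_get]
  generalize pvGet record "nowork_reason" = r
  by_cases h5 : r = "5" <;> by_cases h6 : r = "6" <;> by_cases h7 : r = "7" <;>
    simp [h5, h6, h7]

-- ===== VERDICT (by name: the statement is the Claim_ definition above) =====
theorem build_affidavit_values_py_spec : Claim_equal_build_affidavit_values_py := by
  intro record _
  unfold Spec_build_affidavit_values_py build_affidavit_values_py build_affidavit_values_py_alt
  by_cases hdt : (PySem.Dict.mk record).get? "doc_type" = some "work" <;>
    simp only [hdt, if_pos, ite_false]
  · rw [pv_fold_items record WORK_FIELDS PySem.Dict.empty (by intro kv _; rfl) (by decide)]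
    rw [pv_filterMap_eq_filter_map (fun kv => pvStepA record kv.1) WORK_FIELDS]
    show _ = (List.foldl (fun d p => pvPut d p.1 p.2) PySem.Dict.empty
        [("1", pvGet record "omo_number"), ("4", pvGet record "date_directed"),
         ("5", pvGet record "building_address"), ("6", pvGet record "work_start_date"),
         ("7", pvGet record "work_end_date"), ("15", pvGet record "signer_name"),
         ("8", pvGet record "partial_reason"), ("9", pvGet record "partial_amount"),
         ("10", pvGet record "interrupted_amount"), ("11", pvGet record "prevented_name"),
         ("13", pvGet record "prevented_rel"), ("14", pvGet record "prevented_desc")]).items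
    rw [pv_put_fold_items _ PySem.Dict.empty (by intro p _; rfl) (by simp)]
    rfl
  · rw [pv_fold_items record NOWORK_FIELDS PySem.Dict.empty (by intro kv _; rfl) (by decide)]
    rw [pv_filterMap_eq_filter_map (fun kv => pvStepA record kv.1) NOWORK_FIELDS]
    show _ = (List.foldl (fun d p => pvPut d p.1 p.2) PySem.Dict.empty
        [("1", pvGet record "omo_number"), ("23", pvGet record "building_address"),
         ("4", pvGet record "service_charge"),
         ("5", (pvSplitInacc (pvGet record "inacc_reason")).1),
         ("6", (pvSplitInacc (pvGet record "inacc_reason")).2),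
         ("7", pvGet record "attempt_date1"), ("9", pvGet record "attempt_date2"),
         ("8", pvGet record "phone_date1"), ("10", pvGet record "phone_date2"),
         ("11", if pvGet record "nowork_reason" = "5" then pvGet record "arrival_date" else ""),
         ("12", if pvGet record "nowork_reason" = "6" then pvGet record "arrival_date" else ""),
         ("13", pvGet record "contractor_name"),
         ("14", if pvGet record "nowork_reason" = "7" then pvGet record "arrival_date" else ""),
         ("15", pvGet record "individual_name"), ("16", pvGet record "individual_rel"),
         ("17", pvGet record "individual_desc"), ("18", pvGet record "individual_phone"),
         ("50", pvGet record "signer_name")]).items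
    rw [pv_put_fold_items _ PySem.Dict.empty (by intro p _; rfl) (by simp)]
    simp only [NOWORK_FIELDS, List.map_cons, List.map_nil]
    rw [pv_inacc1, pv_inacc2, pv_arr5, pv_arr6, pv_arr7]
    rfl
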